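-- pv_equiv track=rewrite | github.com/emleda/usyd_info1110 | input_parser.py | valid_emitter_symbol
-- ===== SOURCE A (Python) =====
-- def valid_emitter_symbol(symbol):
--     #Determines if users symbol is valid
--     accepted = ['A', 'B', 'C', 'D', 'E', 'F', 'G', 'H', 'I', 'J']
--     i = 0
--     while i < len(accepted):
--         if symbol == accepted[i]:
--             return True
--         else:
--             i += 1
--     return False
-- ===== SOURCE B (Python) =====
-- def valid_emitter_symbol(symbol):
--     # Closed-form range test: length-1 string whose char lies between 'A' and 'J'
--     return isinstance(symbol, str) and len(symbol) == 1 and 'A' <= symbol <= 'J'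
-- ===== Notes on version B (the rewrite author's own statement) =====
-- stated objective: simpler
-- what changed: Replaced the linear scan over the list ['A'..'J'] with a closed-form ordered range test on a single character ('A' <= symbol <= 'J' for length-1 strings), removing the loop and the list entirely.
import Mathlib
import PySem

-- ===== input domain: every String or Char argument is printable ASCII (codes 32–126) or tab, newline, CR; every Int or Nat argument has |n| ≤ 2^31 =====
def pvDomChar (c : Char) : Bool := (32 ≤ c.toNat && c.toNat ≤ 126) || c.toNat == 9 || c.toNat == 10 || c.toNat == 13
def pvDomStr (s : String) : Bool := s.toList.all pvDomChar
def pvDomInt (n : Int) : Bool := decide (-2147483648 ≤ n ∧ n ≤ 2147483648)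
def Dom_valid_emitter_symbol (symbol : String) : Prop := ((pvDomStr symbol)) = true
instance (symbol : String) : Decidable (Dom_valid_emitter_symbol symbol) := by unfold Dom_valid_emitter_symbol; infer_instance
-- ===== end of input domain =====

-- B replaces A's linear scan over the list ['A'..'J'] with a closed-form range
-- test on a single character (simpler; no loop or list).

-- ===== PORT A =====
-- the while-loop over `accepted`: compare symbol with each element in order
def pvScanA (symbol : String) : List String → Bool
  | [] => false
  | a :: rest => if symbol == a then true else pvScanA symbol rest

def valid_emitter_symbol (symbol : String) : Bool :=
  pvScanA symbol ["A", "B", "C", "D", "E", "F", "G", "H", "I", "J"]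

-- ===== PORT B =====
-- length-1 string whose character lies between 'A' and 'J' (Python's
-- 'A' <= symbol <= 'J' on a length-1 string is this character comparison)
def valid_emitter_symbol_alt (symbol : String) : Bool :=
  match symbol.toList with
  | [c] => decide ('A' ≤ c) && decide (c ≤ 'J')
  | _ => false

-- ===== PRECONDITION & SPEC =====
def Spec_valid_emitter_symbol (symbol : String) (out : Bool) : Prop := out = valid_emitter_symbol_alt symbol
instance (symbol : String) (out : Bool) : Decidable (Spec_valid_emitter_symbol symbol out) := by unfold Spec_valid_emitter_symbol; infer_instance

-- ===== CLAIM (what is proved, stated in full; the proofs are below) =====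
def Claim_equal_valid_emitter_symbol : Prop := ∀ (symbol : String), Dom_valid_emitter_symbol symbol → Spec_valid_emitter_symbol symbol (valid_emitter_symbol symbol)

-- ===== LEMMAS AND PROOFS =====

theorem pv_char_toNat_eq {c d : Char} (h : c.toNat = d.toNat) : c = d :=
  Char.ext (UInt32.toNat_inj.mp h)

-- B's range test on a character holds exactly for the ten letters A..J
theorem pv_char_range (c : Char) :
    ('A' ≤ c ∧ c ≤ 'J') ↔
      (c = 'A' ∨ c = 'B' ∨ c = 'C' ∨ c = 'D' ∨ c = 'E' ∨
       c = 'F' ∨ c = 'G' ∨ c = 'H' ∨ c = 'I' ∨ c = 'J') := by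
  constructor
  · rintro ⟨h1, h2⟩
    have hn1 : 65 ≤ c.toNat := by
      simpa [Char.le_def, UInt32.le_iff_toNat_le] using h1
    have hn2 : c.toNat ≤ 74 := by
      simpa [Char.le_def, UInt32.le_iff_toNat_le] using h2
    have hd : c.toNat = 65 ∨ c.toNat = 66 ∨ c.toNat = 67 ∨ c.toNat = 68 ∨
        c.toNat = 69 ∨ c.toNat = 70 ∨ c.toNat = 71 ∨ c.toNat = 72 ∨
        c.toNat = 73 ∨ c.toNat = 74 := by omega
    rcases hd with h | h | h | h | h | h | h | h | h | h
    · exact Or.inl (pv_char_toNat_eq (d := 'A') h)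
    · exact Or.inr (Or.inl (pv_char_toNat_eq (d := 'B') h))
    · exact Or.inr (Or.inr (Or.inl (pv_char_toNat_eq (d := 'C') h)))
    · exact Or.inr (Or.inr (Or.inr (Or.inl (pv_char_toNat_eq (d := 'D') h))))
    · exact Or.inr (Or.inr (Or.inr (Or.inr (Or.inl (pv_char_toNat_eq (d := 'E') h)))))
    · exact Or.inr (Or.inr (Or.inr (Or.inr (Or.inr (Or.inl (pv_char_toNat_eq (d := 'F') h))))))
    · exact Or.inr (Or.inr (Or.inr (Or.inr (Or.inr (Or.inr (Or.inl (pv_char_toNat_eq (d := 'G') h)))))))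
    · exact Or.inr (Or.inr (Or.inr (Or.inr (Or.inr (Or.inr (Or.inr (Or.inl (pv_char_toNat_eq (d := 'H') h))))))))
    · exact Or.inr (Or.inr (Or.inr (Or.inr (Or.inr (Or.inr (Or.inr (Or.inr (Or.inl (pv_char_toNat_eq (d := 'I') h)))))))))
    · exact Or.inr (Or.inr (Or.inr (Or.inr (Or.inr (Or.inr (Or.inr (Or.inr (Or.inr (pv_char_toNat_eq (d := 'J') h)))))))))
  · rintro (rfl | rfl | rfl | rfl | rfl | rfl | rfl | rfl | rfl | rfl) <;> decide

-- A's scan returns true exactly when the string is one of the ten letters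
theorem pv_scanA_iff (s : String) :
    valid_emitter_symbol s = true ↔
      (s = "A" ∨ s = "B" ∨ s = "C" ∨ s = "D" ∨ s = "E" ∨
       s = "F" ∨ s = "G" ∨ s = "H" ∨ s = "I" ∨ s = "J") := by
  simp only [valid_emitter_symbol, pvScanA, beq_iff_eq]
  split_ifs <;> simp_all

-- B returns true exactly on the same ten strings
theorem pv_alt_iff (s : String) :
    valid_emitter_symbol_alt s = true ↔
      (s = "A" ∨ s = "B" ∨ s = "C" ∨ s = "D" ∨ s = "E" ∨
       s = "F" ∨ s = "G" ∨ s = "H" ∨ s = "I" ∨ s = "J") := by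
  have hlist : ∀ (c : Char) (t : String), t.toList = [c] → (s = t ↔ s.toList = [c]) := by
    intro c t ht
    rw [← String.toList_inj, ht]
  unfold valid_emitter_symbol_alt
  cases hl : s.toList with
  | nil =>
    simp only [Bool.false_eq_true, false_iff]
    rintro (rfl | rfl | rfl | rfl | rfl | rfl | rfl | rfl | rfl | rfl) <;> simp_all
  | cons c rest =>
    cases rest with
    | cons d rest' =>
      simp only [Bool.false_eq_true, false_iff]
      rintro (rfl | rfl | rfl | rfl | rfl | rfl | rfl | rfl | rfl | rfl) <;> simp_all
    | nil =>
      rw [hlist 'A' "A" rfl, hlist 'B' "B" rfl, hlist 'C' "C" rfl, hlist 'D' "D" rfl,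
          hlist 'E' "E" rfl, hlist 'F' "F" rfl, hlist 'G' "G" rfl, hlist 'H' "H" rfl,
          hlist 'I' "I" rfl, hlist 'J' "J" rfl, hl]
      simp only [Bool.and_eq_true, decide_eq_true_eq, List.cons.injEq, and_true]
      exact (pv_char_range c).trans (by simp)

-- ===== VERDICT (by name: the statement is the Claim_ definition above) =====
theorem valid_emitter_symbol_spec : Claim_equal_valid_emitter_symbol := by
  intro s _
  unfold Spec_valid_emitter_symbol
  have := (pv_scanA_iff s).trans (pv_alt_iff s).symm
  cases h : valid_emitter_symbol_alt s <;> simp_all
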